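-- pv_equiv track=rewrite | github.com/9chu/parser_gen | parser_gen.py | _is_ending_by_new_line
-- ===== SOURCE A (Python) =====
-- def _is_ending_by_new_line(text):
--     for i in range(len(text) - 1, -1, -1):
--         ch = text[i:i + 1]
--         if ch == '\n':
--             return True
--         elif not ch.isspace():
--             break
--     return False
-- ===== SOURCE B (Python) =====
-- def _is_ending_by_new_line(text):
--     tail = text[len(text.rstrip()):]
--     return '\n' in tail
-- ===== Notes on version B (the rewrite author's own statement) =====
-- stated objective: simpler
-- what changed: Replaces the explicit backward index loop with early break by one rstrip() call isolating the maximal trailing-whitespace run, followed by a substring membership test.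
import Mathlib
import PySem

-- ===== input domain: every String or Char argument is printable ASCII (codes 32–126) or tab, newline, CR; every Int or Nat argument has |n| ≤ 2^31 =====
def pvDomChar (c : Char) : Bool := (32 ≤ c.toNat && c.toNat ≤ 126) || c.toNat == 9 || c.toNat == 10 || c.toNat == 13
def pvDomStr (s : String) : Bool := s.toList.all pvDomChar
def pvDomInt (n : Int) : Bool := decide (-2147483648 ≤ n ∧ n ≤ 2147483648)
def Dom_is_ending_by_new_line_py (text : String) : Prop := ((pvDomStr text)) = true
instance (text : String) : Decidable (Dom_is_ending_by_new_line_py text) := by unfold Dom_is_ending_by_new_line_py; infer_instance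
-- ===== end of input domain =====

-- B replaces A's explicit backward index loop (with early break) by one rstrip call
-- isolating the trailing-whitespace run plus a substring membership test (objective: simpler).

-- ===== PORT A =====
-- the backward loop 'for i in range(len(text)-1, -1, -1)' with its early returns and break
def pvLoopA (cs : List Char) : List Int → Bool
  | [] => false
  | i :: rest =>
    let ch := PySem.Chars.slice cs (some i) (some (i + 1))
    if ch = ['\n'] then true
    else if !PySem.Chars.strIsspace ch then false
    else pvLoopA cs rest

def is_ending_by_new_line_py (text : String) : Bool :=
  pvLoopA text.toList (PySem.List.pyRange (PySem.Str.len text - 1) (-1) (-1))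

-- ===== PORT B =====
def is_ending_by_new_line_py_alt (text : String) : Bool :=
  let tail := PySem.Chars.slice text.toList
      (some ((PySem.Chars.rstrip text.toList).length : Int)) none
  PySem.Chars.isIn ['\n'] tail

-- ===== PRECONDITION & SPEC =====
def Spec_is_ending_by_new_line_py (text : String) (out : Bool) : Prop := out = is_ending_by_new_line_py_alt text
instance (text : String) (out : Bool) : Decidable (Spec_is_ending_by_new_line_py text out) := by unfold Spec_is_ending_by_new_line_py; infer_instance

-- ===== CLAIM (what is proved, stated in full; the proofs are below) =====
def Claim_equal_is_ending_by_new_line_py : Prop := ∀ (text : String), Dom_is_ending_by_new_line_py text → Spec_is_ending_by_new_line_py text (is_ending_by_new_line_py text)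

-- ===== LEMMAS AND PROOFS =====

-- common reference form: scan the reversed characters, stop at the first non-space
def pvAux : List Char → Bool
  | [] => false
  | c :: r => if c = '\n' then true else if PySem.Chars.isspace c then pvAux r else false

-- A's loop over range(k-1, -1, -1) is the reference scan of the reversed k-prefix
theorem pvLoopA_take (cs : List Char) : ∀ (k : Nat), k ≤ cs.length →
    pvLoopA cs (PySem.List.pyRange ((k : Int) - 1) (-1) (-1)) = pvAux (cs.take k).reverse := by
  intro k
  induction k with
  | zero =>
    intro _
    rw [PySem.List.pyRange_neg_one_eq_nil (by omega)]
    simp [pvLoopA, pvAux]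
  | succ k ih =>
    intro hk
    have hklt : k < cs.length := by omega
    rw [show ((k + 1 : Nat) : Int) - 1 = (k : Int) by push_cast; ring,
      PySem.List.pyRange_neg_one_cons (by omega)]
    have hch : PySem.Chars.slice cs (some (k : Int)) (some ((k : Int) + 1)) = [cs[k]] := by
      show PySem.List.slice cs (some ((k : Nat) : Int)) (some ((k : Int) + 1)) = [cs[k]]
      rw [show ((k : Int) + 1) = (((k + 1 : Nat)) : Int) by push_cast; ring,
        PySem.List.slice_natCast, List.drop_eq_getElem_cons hklt, Nat.add_sub_cancel_left]
      rfl
    have htake : (cs.take (k + 1)).reverse = cs[k] :: (cs.take k).reverse := by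
      rw [List.take_add_one]
      simp [List.getElem?_eq_getElem hklt]
    rw [htake]
    show (if PySem.Chars.slice cs (some (k : Int)) (some ((k : Int) + 1)) = ['\n'] then true
      else if !PySem.Chars.strIsspace (PySem.Chars.slice cs (some (k : Int)) (some ((k : Int) + 1))) then false
      else pvLoopA cs (PySem.List.pyRange ((k : Int) - 1) (-1) (-1))) = _
    rw [hch, ih (by omega)]
    simp [pvAux, PySem.Chars.strIsspace]

-- the reference scan tests newline membership in the leading whitespace run
theorem pvAux_mem_takeWhile (rl : List Char) :
    pvAux rl = true ↔ '\n' ∈ rl.takeWhile PySem.Chars.isspace := by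
  induction rl with
  | nil => simp [pvAux]
  | cons c r ih =>
    by_cases h1 : c = '\n'
    · subst h1
      simp [pvAux, show PySem.Chars.isspace '\n' = true by decide]
    · by_cases h2 : PySem.Chars.isspace c <;>
        simp [pvAux, h1, h2, ih, Ne.symm h1]

-- B's rstrip-then-membership equals the reference scan
theorem pvAlt_chars (cs : List Char) :
    PySem.Chars.isIn ['\n']
        (PySem.Chars.slice cs (some ((PySem.Chars.rstrip cs).length : Int)) none)
      = pvAux cs.reverse := by
  have htail : PySem.Chars.slice cs (some ((PySem.Chars.rstrip cs).length : Int)) none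
      = (List.takeWhile PySem.Chars.isspace cs.reverse).reverse := by
    show PySem.List.slice cs (some ((PySem.Chars.rstrip cs).length : Int)) none = _
    rw [PySem.List.slice_from_natCast]
    have hlen : (PySem.Chars.rstrip cs).length
        = ((List.dropWhile PySem.Chars.isspace cs.reverse).reverse).length := by
      simp [PySem.Chars.rstrip]
    have hsplit : cs = (List.dropWhile PySem.Chars.isspace cs.reverse).reverse
        ++ (List.takeWhile PySem.Chars.isspace cs.reverse).reverse := by
      conv_lhs => rw [← List.reverse_reverse cs,
        ← List.takeWhile_append_dropWhile (p := PySem.Chars.isspace) (l := cs.reverse)]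
      rw [List.reverse_append]
    rw [hlen]
    nth_rewrite 2 [hsplit]
    rw [List.drop_left]
  rw [htail]
  refine Bool.eq_iff_iff.mpr ?_
  rw [PySem.Chars.isIn_iff_infix, pvAux_mem_takeWhile, ← List.mem_reverse]
  constructor
  · intro hinf
    exact hinf.subset (by simp)
  · intro hmem
    obtain ⟨l₁, l₂, hsp⟩ := List.append_of_mem hmem
    exact ⟨l₁, l₂, by rw [hsp]; simp⟩

-- ===== VERDICT (by name: the statement is the Claim_ definition above) =====
theorem is_ending_by_new_line_py_spec : Claim_equal_is_ending_by_new_line_py := by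
  intro text _
  unfold Spec_is_ending_by_new_line_py is_ending_by_new_line_py is_ending_by_new_line_py_alt
  rw [pvAlt_chars, PySem.Str.len_eq,
    pvLoopA_take text.toList text.toList.length (le_refl _), List.take_length]
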